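-- pv_equiv track=rewrite | github.com/lmendezayl/uba-algoritmos-3 | talleres/taller1/aleunos.py | f
-- ===== SOURCE A (Python) =====
-- def f(n, seq=None) -> list[int]:
--     if seq is None:
--         seq = [n//2, n%2, n//2]
--     for e in seq:
--         if e == 1 or e == 0:
--             return seq
--         else:
--             return f(e) + [seq[1]] + f(e)[::-1]
-- ===== SOURCE B (Python) =====
-- def _core(n):
--     # peel bits down to the 2-digit base, then build the palindrome bottom-up,
--     # computing each level once (A recomputes f(e) twice per level)
--     bits = []
--     while not (0 <= n <= 3):
--         bits.append(n % 2)
--         n //= 2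
--     res = [n // 2, n % 2, n // 2]
--     for b in reversed(bits):
--         res = res + [b] + res[::-1]
--     return res
--
-- def f(n, seq=None):
--     if seq is None:
--         return _core(n)
--     if seq[0] in (0, 1):
--         return seq
--     core = _core(seq[0])
--     return core + [seq[1]] + core[::-1]
-- ===== Notes on version B (the rewrite author's own statement) =====
-- stated objective: faster
-- what changed: replaces A's doubly-recursive rebuild (f(e) is recomputed twice at every level) by an iterative bit-peeling loop that builds the palindromic list bottom-up, computing each level once
-- outside the precondition, e.g. on f(0, []): A returns None, B raises IndexError
import Mathlib
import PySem

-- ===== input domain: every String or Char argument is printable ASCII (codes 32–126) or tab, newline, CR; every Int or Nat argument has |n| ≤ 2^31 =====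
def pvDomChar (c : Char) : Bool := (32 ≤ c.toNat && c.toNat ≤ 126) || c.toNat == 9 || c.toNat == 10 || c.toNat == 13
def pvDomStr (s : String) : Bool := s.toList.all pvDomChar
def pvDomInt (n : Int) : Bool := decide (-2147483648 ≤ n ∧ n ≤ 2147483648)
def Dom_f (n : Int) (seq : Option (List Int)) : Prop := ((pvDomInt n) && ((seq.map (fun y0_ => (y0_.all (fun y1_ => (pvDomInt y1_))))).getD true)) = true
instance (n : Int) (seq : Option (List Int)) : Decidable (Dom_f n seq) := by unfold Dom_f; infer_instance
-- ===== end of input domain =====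

-- B builds the palindrome iteratively from the peeled bits, computing each level once
-- where A recomputes f(e) twice per level; return-value equivalence on Pre_f.

-- ===== PORT A =====
-- fuel only makes the recursion total; inside Pre_f it is never exhausted
def fAux : Nat → Int → Option (List Int) → List Int
  | 0, _, _ => []
  | fuel+1, n, seq =>
    let s : List Int :=
      match seq with
      | none => [PySem.Int.floordiv n 2, PySem.Int.mod n 2, PySem.Int.floordiv n 2]
      | some s => s
    match s with
    | [] => []                    -- Python falls off the loop and returns None (excluded by Pre_f)
    | e :: _ =>
      if e = 1 ∨ e = 0 then s
      else
        match PySem.List.pyGet? s 1 with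
        | none => []              -- IndexError (excluded by Pre_f)
        | some m => fAux fuel e none ++ [m] ++ (fAux fuel e none).reverse

def f (n : Int) (seq : Option (List Int)) : List Int :=
  fAux (n.natAbs + ((seq.getD []).headD 0).natAbs + 2) n seq

-- ===== PORT B =====
-- the while loop of _core; fuel only makes it total, never exhausted for 0 ≤ n
def bitsAux : Nat → Int → List Int → List Int × Int
  | 0, m, bits => (bits, m)
  | fuel+1, m, bits =>
    if 0 ≤ m ∧ m ≤ 3 then (bits, m)
    else bitsAux fuel (PySem.Int.floordiv m 2) (bits ++ [PySem.Int.mod m 2])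

def fCore (n : Int) : List Int :=
  let p := bitsAux (n.natAbs + 1) n []
  let m := p.2
  let res0 : List Int := [PySem.Int.floordiv m 2, PySem.Int.mod m 2, PySem.Int.floordiv m 2]
  p.1.reverse.foldl (fun res b => res ++ [b] ++ res.reverse) res0

def f_alt (n : Int) (seq : Option (List Int)) : List Int :=
  match seq with
  | none => fCore n
  | some s =>
    match PySem.List.pyGet? s 0 with
    | none => []                  -- IndexError (excluded by Pre_f)
    | some h =>
      if h = 0 ∨ h = 1 then s
      else
        match PySem.List.pyGet? s 1 with
        | none => []              -- IndexError (excluded by Pre_f)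
        | some mid =>
          let core := fCore h
          core ++ [mid] ++ core.reverse

-- ===== PRECONDITION & SPEC =====
-- Pre_f excludes exactly the inputs where A does not return a list: negative n with no seq
-- (RecursionError), an empty seq (A returns None), a seq whose head is negative
-- (RecursionError) or ≥ 2 with no second element (IndexError).
def Pre_f (n : Int) (seq : Option (List Int)) : Prop :=
  if seq = none then 0 ≤ n
  else seq.getD [] ≠ [] ∧
    ((seq.getD []).headD 0 = 0 ∨ (seq.getD []).headD 0 = 1 ∨
      (2 ≤ (seq.getD []).headD 0 ∧ 2 ≤ (seq.getD []).length))
instance (n : Int) (seq : Option (List Int)) : Decidable (Pre_f n seq) := by unfold Pre_f; infer_instance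

def pvWitness_f : Int × Option (List Int) := (13, none)

def Spec_f (n : Int) (seq : Option (List Int)) (out : List Int) : Prop := out = f_alt n seq
instance (n : Int) (seq : Option (List Int)) (out : List Int) : Decidable (Spec_f n seq out) := by unfold Spec_f; infer_instance

-- ===== CLAIM (what is proved, stated in full; the proofs are below) =====
def Claim_equal_f : Prop := ∀ (n : Int) (seq : Option (List Int)), Dom_f n seq → Pre_f n seq → Spec_f n seq (f n seq)

-- ===== LEMMAS AND PROOFS =====

-- one-step unfolding lemmas for the fuelled recursions (all rfl)
lemma fAux_succ_none (fuel : Nat) (n : Int) :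
    fAux (fuel+1) n none =
      (if PySem.Int.floordiv n 2 = 1 ∨ PySem.Int.floordiv n 2 = 0
       then [PySem.Int.floordiv n 2, PySem.Int.mod n 2, PySem.Int.floordiv n 2]
       else match PySem.List.pyGet? [PySem.Int.floordiv n 2, PySem.Int.mod n 2, PySem.Int.floordiv n 2] 1 with
            | none => []
            | some m => fAux fuel (PySem.Int.floordiv n 2) none ++ [m] ++ (fAux fuel (PySem.Int.floordiv n 2) none).reverse) := rfl

lemma fAux_succ_some (fuel : Nat) (n h : Int) (t : List Int) :
    fAux (fuel+1) n (some (h :: t)) =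
      (if h = 1 ∨ h = 0 then h :: t
       else match PySem.List.pyGet? (h :: t) 1 with
            | none => []
            | some m => fAux fuel h none ++ [m] ++ (fAux fuel h none).reverse) := rfl

-- reference versions of the bit-peeling loop, recursive on the Nat value
def bitsOf (m : Nat) : List Int :=
  if m ≤ 3 then [] else ((m % 2 : Nat) : Int) :: bitsOf (m / 2)
decreasing_by omega

def baseOf (m : Nat) : Nat :=
  if m ≤ 3 then m else baseOf (m / 2)
decreasing_by omega

lemma bitsOf_step (m : Nat) (h3 : ¬ m ≤ 3) :
    bitsOf m = ((m % 2 : Nat) : Int) :: bitsOf (m / 2) := by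
  rw [bitsOf]; rw [if_neg h3]

lemma baseOf_step (m : Nat) (h3 : ¬ m ≤ 3) : baseOf m = baseOf (m / 2) := by
  rw [baseOf]; rw [if_neg h3]

lemma bitsAux_eq (m : Nat) : ∀ (fuel : Nat) (acc : List Int), m < fuel →
    bitsAux fuel (m : Int) acc = (acc ++ bitsOf m, ((baseOf m : Nat) : Int)) := by
  induction m using Nat.strong_induction_on with
  | _ m ih =>
    intro fuel acc hf
    match fuel, hf with
    | fuel+1, hf =>
      by_cases h3 : m ≤ 3
      · simp [bitsAux, bitsOf, baseOf, h3]
      · have h2 : (PySem.Int.floordiv (m : Int) 2) = ((m / 2 : Nat) : Int) :=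
          PySem.Int.floordiv_natCast m 2
        have hm : (PySem.Int.mod (m : Int) 2) = ((m % 2 : Nat) : Int) :=
          PySem.Int.mod_natCast m 2
        have hrec := ih (m / 2) (by omega) fuel (acc ++ [((m % 2 : Nat) : Int)]) (by omega)
        simp only [bitsAux, h2, hm]
        rw [if_neg (by omega), hrec, bitsOf_step m h3, baseOf_step m h3]
        simp

lemma fCore_natCast (m : Nat) :
    fCore (m : Int) =
      (bitsOf m).reverse.foldl (fun res b => res ++ [b] ++ res.reverse)
        [((baseOf m / 2 : Nat) : Int), ((baseOf m % 2 : Nat) : Int), ((baseOf m / 2 : Nat) : Int)] := by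
  have h := bitsAux_eq m ((m : Int).natAbs + 1) [] (by simp)
  simp only [fCore, h]
  simp

lemma fCore_base (m : Nat) (h3 : m ≤ 3) :
    fCore (m : Int) = [((m / 2 : Nat) : Int), ((m % 2 : Nat) : Int), ((m / 2 : Nat) : Int)] := by
  rw [fCore_natCast]
  rw [bitsOf, baseOf]
  rw [if_pos h3, if_pos h3]
  simp

lemma fCore_step (m : Nat) (h4 : 4 ≤ m) :
    fCore (m : Int) = fCore ((m / 2 : Nat) : Int) ++ [((m % 2 : Nat) : Int)] ++ (fCore ((m / 2 : Nat) : Int)).reverse := by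
  rw [fCore_natCast m, fCore_natCast (m / 2)]
  rw [bitsOf_step m (by omega), baseOf_step m (by omega)]
  simp [List.foldl_append]

lemma pyGet?_mid (a b c : Int) : PySem.List.pyGet? [a, b, c] 1 = some b := by
  simp [PySem.List.pyGet?, PySem.List.pyIdx?]

lemma fAux_none (m : Nat) : ∀ fuel : Nat, m < fuel → fAux fuel (m : Int) none = fCore (m : Int) := by
  induction m using Nat.strong_induction_on with
  | _ m ih =>
    intro fuel hf
    match fuel, hf with
    | fuel+1, hf =>
      rw [fAux_succ_none]
      have h2 : (PySem.Int.floordiv (m : Int) 2) = ((m / 2 : Nat) : Int) :=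
        PySem.Int.floordiv_natCast m 2
      have hm : (PySem.Int.mod (m : Int) 2) = ((m % 2 : Nat) : Int) :=
        PySem.Int.mod_natCast m 2
      rw [h2, hm]
      by_cases h3 : m ≤ 3
      · rw [if_pos (by interval_cases m <;> simp), fCore_base m h3]
      · rw [if_neg (by push_cast; omega), pyGet?_mid]
        rw [ih (m / 2) (by omega) fuel (by omega), fCore_step m (by omega)]

lemma fAux_none' (n : Int) (hn : 0 ≤ n) (fuel : Nat) (hf : n.toNat < fuel) :
    fAux fuel n none = fCore n := by
  have hc : n = ((n.toNat : Nat) : Int) := by omega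
  rw [hc]
  exact fAux_none n.toNat fuel (by omega)

lemma f_none (n : Int) (hn : 0 ≤ n) : f n none = fCore n := by
  rw [f]
  exact fAux_none' n hn _ (by omega)

-- ===== VERDICT (by name: the statement is the Claim_ definition above) =====
theorem f_spec : Claim_equal_f := by
  intro n seq _ hpre
  unfold Spec_f
  match seq with
  | none =>
    simp only [Pre_f] at hpre
    simp only [f_alt]
    exact f_none n hpre
  | some (h :: t) =>
    simp only [Pre_f, Option.getD_some, List.headD_cons] at hpre
    obtain ⟨-, hh⟩ := hpre
    have hget0 : PySem.List.pyGet? (h :: t) (0 : Int) = some h := by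
      simp [PySem.List.pyGet?, PySem.List.pyIdx?]
    show fAux (n.natAbs + h.natAbs + 1 + 1) n (some (h :: t)) = f_alt n (some (h :: t))
    rw [fAux_succ_some]
    by_cases h01 : h = 1 ∨ h = 0
    · simp only [f_alt, hget0]
      rw [if_pos h01, if_pos (by tauto)]
    · have hh2 : 2 ≤ h ∧ 2 ≤ (h :: t).length := by
        rcases hh with h0 | h1 | hx
        · exact absurd (Or.inr h0) h01
        · exact absurd (Or.inl h1) h01
        · exact hx
      obtain ⟨hge2, hlen⟩ := hh2
      match t with
      | t0 :: ts =>
        have hget1 : PySem.List.pyGet? (h :: t0 :: ts) (1 : Int) = some t0 := by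
          simp [PySem.List.pyGet?, PySem.List.pyIdx?]
        rw [if_neg h01, hget1]
        simp only [f_alt, hget0, hget1]
        rw [if_neg (by tauto)]
        rw [fAux_none' h (by omega) _ (by omega)]
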